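-- pv_equiv track=rewrite | github.com/h4cktivist/review_analyser | review_processor/event_comparator.py | fast_filter
-- ===== SOURCE A (Python) =====
-- def fast_filter(review_lemmas, event_index) -> list:
--     candidates = []
--
--     for event_id, event_data in event_index.items():
--         key_lemmas = event_data['key_lemmas']
--
--         if key_lemmas.intersection(review_lemmas):
--             match_count = len(key_lemmas.intersection(review_lemmas))
--             candidates.append((event_id, match_count))
--
--     candidates.sort(key=lambda x: x[1], reverse=True)
--     return [candidate[0] for candidate in candidates]
-- ===== SOURCE B (Python) =====
-- def fast_filter(review_lemmas, event_index) -> list: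
--     # Counting sort on the bounded match count instead of comparison sort.
--     rset = set(review_lemmas)
--     n = len(rset)
--     buckets = [[] for _ in range(n + 1)]
--
--     for event_id, event_data in event_index.items():
--         c = len(event_data['key_lemmas'] & rset)
--         if c:
--             buckets[c].append(event_id)
--
--     result = []
--     for c in range(n, 0, -1):
--         result.extend(buckets[c])
--     return result
-- ===== Notes on version B (the rewrite author's own statement) =====
-- stated objective: faster
-- what changed: B replaces A's candidate-list build plus comparison sort on (id, count) pairs by a counting sort: ids are appended to buckets indexed by their bounded match count and the buckets are concatenated from high count to low, preserving A's stable-reverse tie order.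
import Mathlib
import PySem

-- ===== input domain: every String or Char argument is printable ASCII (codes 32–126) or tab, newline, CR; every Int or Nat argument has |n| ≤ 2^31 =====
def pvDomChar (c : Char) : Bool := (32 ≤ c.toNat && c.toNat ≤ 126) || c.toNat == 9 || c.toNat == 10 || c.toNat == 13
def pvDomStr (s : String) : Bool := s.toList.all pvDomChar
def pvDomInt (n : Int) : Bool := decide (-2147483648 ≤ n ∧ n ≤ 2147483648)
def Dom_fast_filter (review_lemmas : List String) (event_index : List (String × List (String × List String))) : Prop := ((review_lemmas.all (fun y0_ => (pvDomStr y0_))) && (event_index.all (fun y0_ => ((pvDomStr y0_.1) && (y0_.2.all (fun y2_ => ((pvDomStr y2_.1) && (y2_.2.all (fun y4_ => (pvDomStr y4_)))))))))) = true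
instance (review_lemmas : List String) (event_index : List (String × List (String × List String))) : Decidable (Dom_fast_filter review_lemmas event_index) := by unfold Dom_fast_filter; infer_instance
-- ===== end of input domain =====

-- B replaces A's comparison sort of (id, count) pairs by a counting sort: ids are appended to
-- buckets indexed by their (bounded) match count and the buckets are emitted from high count to low.

-- ===== PORT A =====
-- event_data['key_lemmas']  (KeyError when absent — those inputs are excluded by Pre_fast_filter)
def pvKeyLemmas? (event_data : List (String × List String)) : Option (List String) :=
  (PySem.Dict.ofList event_data).get? "key_lemmas"

-- key_lemmas.intersection(review_lemmas): key_lemmas is a Python set (modelled as its distinct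
-- elements in first-insertion order); only emptiness and length of the result are consumed.
def pvInter (key_lemmas review_lemmas : List String) : List String :=
  PySem.Set.inter (PySem.Set.ofList key_lemmas) review_lemmas

def fast_filter (review_lemmas : List String) (event_index : List (String × List (String × List String))) : List String :=
  let candidates : List (String × Int) :=
    ((PySem.Dict.ofList event_index).items).foldl (fun acc p =>
      match pvKeyLemmas? p.2 with
      | none => acc            -- Python raises KeyError here; outside Pre_fast_filter
      | some key_lemmas =>
        if pvInter key_lemmas review_lemmas ≠ [] then
          acc ++ [(p.1, ((pvInter key_lemmas review_lemmas).length : Int))]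
        else acc) []
  (PySem.List.sorted candidates (fun x => x.2) true).map (fun c => c.1)

-- ===== PORT B =====
-- len(event_data['key_lemmas'] & rset)
def pvMatchCount (rset : List String) (event_data : List (String × List String)) : Int :=
  ((PySem.Set.inter (PySem.Set.ofList (((PySem.Dict.ofList event_data).get? "key_lemmas").getD [])) rset).length : Int)

def fast_filter_alt (review_lemmas : List String) (event_index : List (String × List (String × List String))) : List String :=
  let rset := PySem.Set.ofList review_lemmas
  let n := rset.length
  let buckets : List (List String) :=
    ((PySem.Dict.ofList event_index).items).foldl (fun bk p =>
      match (PySem.Dict.ofList p.2).get? "key_lemmas" with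
      | none => bk             -- Python raises KeyError here; outside Pre_fast_filter
      | some _ =>
        let c := pvMatchCount rset p.2
        -- buckets[c].append(event_id); 0 ≤ c ≤ n always (c counts distinct members of rset)
        if c ≠ 0 then bk.set c.toNat (bk.getD c.toNat [] ++ [p.1]) else bk)
      (List.replicate (n + 1) [])
  -- for c in range(n, 0, -1): result.extend(buckets[c])
  (PySem.List.pyRange (n : Int) 0 (-1)).foldl (fun acc c => acc ++ buckets.getD c.toNat []) []

-- ===== PRECONDITION & SPEC =====
-- Pre_ excludes exactly the inputs on which Python raises KeyError: some event (as seen by dict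
-- semantics, last value of a duplicated id) lacks the 'key_lemmas' key.
def Pre_fast_filter (review_lemmas : List String) (event_index : List (String × List (String × List String))) : Prop :=
  ∀ p ∈ (PySem.Dict.ofList event_index).items, ((PySem.Dict.ofList p.2).get? "key_lemmas").isSome = true
instance (review_lemmas : List String) (event_index : List (String × List (String × List String))) : Decidable (Pre_fast_filter review_lemmas event_index) := by unfold Pre_fast_filter; infer_instance

def pvWitness_fast_filter : List String × (List (String × List (String × List String))) :=
  (["a", "b"], [("e1", [("key_lemmas", ["a", "c"])]), ("e2", [("key_lemmas", ["a", "b"])])])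

def Spec_fast_filter (review_lemmas : List String) (event_index : List (String × List (String × List String))) (out : List String) : Prop := out = fast_filter_alt review_lemmas event_index
instance (review_lemmas : List String) (event_index : List (String × List (String × List String))) (out : List String) : Decidable (Spec_fast_filter review_lemmas event_index out) := by unfold Spec_fast_filter; infer_instance

-- ===== CLAIM (what is proved, stated in full; the proofs are below) =====
def Claim_equal_fast_filter : Prop := ∀ (review_lemmas : List String) (event_index : List (String × List (String × List String))), Dom_fast_filter review_lemmas event_index → Pre_fast_filter review_lemmas event_index → Spec_fast_filter review_lemmas event_index (fast_filter review_lemmas event_index)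

-- ===== LEMMAS AND PROOFS =====

-- intersecting with review_lemmas and with set(review_lemmas) filter by the same membership test
theorem pv_inter_ofList (kl rl : List String) :
    PySem.Set.inter (PySem.Set.ofList kl) (PySem.Set.ofList rl) = pvInter kl rl := by
  unfold pvInter PySem.Set.inter
  apply List.filter_congr
  intro x _
  simp [PySem.Set.mem_ofList]

-- the intersection has at most |set(review_lemmas)| elements: it is a nodup list of members of rset
theorem pv_inter_le (kl rl : List String) :
    (pvInter kl rl).length ≤ (PySem.Set.ofList rl).length := by
  rw [← pv_inter_ofList]
  apply List.Subperm.length_le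
  apply List.subperm_of_subset
  · exact (PySem.Set.nodup_ofList kl).filter _
  · intro x hx
    unfold PySem.Set.inter at hx
    simpa [List.contains_iff_exists_mem_beq] using List.of_mem_filter hx

-- the canonical per-event candidate step (A's loop body)
def pvStepA (rl : List String) (acc : List (String × Int)) (p : String × List (String × List String)) : List (String × Int) :=
  match pvKeyLemmas? p.2 with
  | none => acc
  | some kl => if pvInter kl rl ≠ [] then acc ++ [(p.1, ((pvInter kl rl).length : Int))] else acc

-- the buckets that B's loop maintains, expressed from A's candidate list
def pvBucketsOf (n : Nat) (cs : List (String × Int)) : List (List String) :=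
  (List.range (n + 1)).map (fun (k : Nat) => (cs.filter (fun q => q.2 == ((k : Nat) : Int))).map Prod.fst)

theorem pvBucketsOf_length (n : Nat) (cs : List (String × Int)) : (pvBucketsOf n cs).length = n + 1 := by
  simp [pvBucketsOf]

theorem pvBucketsOf_getElem (n : Nat) (cs : List (String × Int)) (k : Nat) (hk : k < n + 1) :
    (pvBucketsOf n cs)[k]'(by simp [pvBucketsOf_length, hk]) = (cs.filter (fun q => q.2 == (k : Int))).map Prod.fst := by
  simp only [pvBucketsOf, List.getElem_map, List.getElem_range]

-- appending one candidate with count c (1 ≤ c ≤ n) updates exactly bucket c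
theorem pvBucketsOf_append (n : Nat) (cs : List (String × Int)) (s : String) (c : Int)
    (h1 : 1 ≤ c) (h2 : c ≤ (n : Int)) :
    pvBucketsOf n (cs ++ [(s, c)]) =
      (pvBucketsOf n cs).set c.toNat ((pvBucketsOf n cs).getD c.toNat [] ++ [s]) := by
  have hcn : c.toNat < n + 1 := by omega
  apply List.ext_getElem
  · simp [pvBucketsOf_length]
  · intro k hk1 hk2
    rw [pvBucketsOf_length] at hk1
    rw [List.getElem_set]
    by_cases hkc : c.toNat = k
    · rw [if_pos hkc]
      subst hkc
      rw [List.getD_eq_getElem _ _ (by rw [pvBucketsOf_length]; omega),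
        pvBucketsOf_getElem n cs _ hcn, pvBucketsOf_getElem n _ _ hcn]
      have hceq : ((c.toNat : Int)) = c := by omega
      simp [List.filter_append, hceq]
    · rw [if_neg hkc, pvBucketsOf_getElem n _ _ hk1, pvBucketsOf_getElem n _ _ hk1]
      have hne : ¬ (c = (k : Int)) := by omega
      simp [List.filter_append, hne]

-- B's bucket loop computes pvBucketsOf of A's candidate loop
theorem pv_fold_buckets (rl : List String) (L : List (String × List (String × List String))) :
    ∀ cs0 : List (String × Int),
    L.foldl (fun bk p =>
      match (PySem.Dict.ofList p.2).get? "key_lemmas" with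
      | none => bk
      | some _ =>
        let c := pvMatchCount (PySem.Set.ofList rl) p.2
        if c ≠ 0 then bk.set c.toNat (bk.getD c.toNat [] ++ [p.1]) else bk)
      (pvBucketsOf (PySem.Set.ofList rl).length cs0)
    = pvBucketsOf (PySem.Set.ofList rl).length (L.foldl (pvStepA rl) cs0) := by
  induction L with
  | nil => intro cs0; rfl
  | cons p t ih =>
    intro cs0
    rw [List.foldl_cons, List.foldl_cons]
    have hstep :
        (match (PySem.Dict.ofList p.2).get? "key_lemmas" with
          | none => pvBucketsOf (PySem.Set.ofList rl).length cs0
          | some _ =>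
            let c := pvMatchCount (PySem.Set.ofList rl) p.2
            if c ≠ 0 then (pvBucketsOf (PySem.Set.ofList rl).length cs0).set c.toNat ((pvBucketsOf (PySem.Set.ofList rl).length cs0).getD c.toNat [] ++ [p.1]) else pvBucketsOf (PySem.Set.ofList rl).length cs0)
        = pvBucketsOf (PySem.Set.ofList rl).length (pvStepA rl cs0 p) := by
      unfold pvStepA pvMatchCount pvKeyLemmas?
      cases hkl : (PySem.Dict.ofList p.2).get? "key_lemmas" with
      | none => simp
      | some kl =>
        simp only [Option.getD_some]
        rw [pv_inter_ofList]
        by_cases hz : pvInter kl rl = []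
        · simp [hz]
        · have hlenne : (pvInter kl rl).length ≠ 0 := by simpa [List.length_eq_zero_iff] using hz
          have hne : ((pvInter kl rl).length : Int) ≠ 0 := by exact_mod_cast hlenne
          have hlen : 1 ≤ ((pvInter kl rl).length : Int) := by omega
          have hle : ((pvInter kl rl).length : Int) ≤ ((PySem.Set.ofList rl).length : Int) := by
            exact_mod_cast pv_inter_le kl rl
          rw [if_pos hne, if_pos hz]
          exact (pvBucketsOf_append _ _ _ _ hlen hle).symm
    rw [hstep, ih]

-- every candidate count lies in [1, |set(review_lemmas)|]
theorem pv_cands_bound (rl : List String) (L : List (String × List (String × List String))) :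
    ∀ acc : List (String × Int), (∀ q ∈ acc, 1 ≤ q.2 ∧ q.2 ≤ ((PySem.Set.ofList rl).length : Int)) →
    ∀ q ∈ L.foldl (pvStepA rl) acc, 1 ≤ q.2 ∧ q.2 ≤ ((PySem.Set.ofList rl).length : Int) := by
  induction L with
  | nil => intro acc hacc q hq; exact hacc q hq
  | cons p t ih =>
    intro acc hacc q hq
    rw [List.foldl_cons] at hq
    refine ih _ ?_ q hq
    intro r hr
    unfold pvStepA at hr
    cases hkl : pvKeyLemmas? p.2 with
    | none => simp only [hkl] at hr; exact hacc r hr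
    | some kl =>
      simp only [hkl] at hr
      by_cases hz : pvInter kl rl = []
      · simp [hz] at hr; exact hacc r hr
      · rw [if_pos (by simpa using hz)] at hr
        rcases List.mem_append.mp hr with h | h
        · exact hacc r h
        · simp at h
          subst h
          have h0 : (pvInter kl rl).length ≠ 0 := by simpa [List.length_eq_zero_iff] using hz
          have hle : (pvInter kl rl).length ≤ (PySem.Set.ofList rl).length := pv_inter_le kl rl
          exact ⟨by simp; omega, by simp; omega⟩

-- skipping a prefix no element of which triggers insertion
theorem pv_insertBy_append (before : (String × Int) → (String × Int) → Bool) (x : String × Int) :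
    ∀ (A B : List (String × Int)), (∀ a ∈ A, before x a = false) →
    PySem.List.insertBy before x (A ++ B) = A ++ PySem.List.insertBy before x B := by
  intro A
  induction A with
  | nil => intro B _; simp
  | cons a t ih =>
    intro B h
    have ha : before x a = false := h a (by simp)
    have hstep : PySem.List.insertBy before x (a :: (t ++ B)) =
        if before x a then x :: a :: (t ++ B) else a :: PySem.List.insertBy before x (t ++ B) := rfl
    simp only [List.cons_append, hstep, ha, Bool.false_eq_true, if_false]
    rw [ih B (fun y hy => h y (by simp [hy]))]

-- inserting a pair whose key is in the strictly decreasing key list lands at the end of its bucket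
theorem pv_insert_buckets (ks : List Int) (hks : ks.Pairwise (fun a b => b < a)) (x : String × Int)
    (hx : x.2 ∈ ks) (cs : List (String × Int)) :
    PySem.List.insertBy (fun a b => decide (b.2 < a.2)) x
        (ks.flatMap (fun k => cs.filter (fun q => q.2 == k)))
      = ks.flatMap (fun k => (cs ++ [x]).filter (fun q => q.2 == k)) := by
  induction ks with
  | nil => cases hx
  | cons k t ih =>
    have hpair := List.pairwise_cons.mp hks
    rw [List.flatMap_cons, List.flatMap_cons]
    by_cases hxk : x.2 = k
    · -- x belongs to the first bucket: skip it, then x precedes everything in the tail buckets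
      rw [pv_insertBy_append _ _ _ _ (by
        intro a ha
        have ha2 : a.2 = k := by simpa using List.of_mem_filter ha
        simp [ha2, hxk])]
      have hrest : PySem.List.insertBy (fun a b => decide (b.2 < a.2)) x
          (t.flatMap (fun k => cs.filter (fun q => q.2 == k))) =
          x :: t.flatMap (fun k => cs.filter (fun q => q.2 == k)) := by
        cases hB : t.flatMap (fun k => cs.filter (fun q => q.2 == k)) with
        | nil => rfl
        | cons y ys =>
          have hy : y ∈ t.flatMap (fun k => cs.filter (fun q => q.2 == k)) := by simp [hB]
          obtain ⟨k', hk', hyf⟩ := List.mem_flatMap.mp hy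
          have hy2 : y.2 = k' := by simpa using List.of_mem_filter hyf
          have hlt : y.2 < x.2 := by rw [hy2, hxk]; exact hpair.1 k' hk'
          have : PySem.List.insertBy (fun a b => decide (b.2 < a.2)) x (y :: ys) =
              if decide (y.2 < x.2) then x :: y :: ys else y :: PySem.List.insertBy (fun a b => decide (b.2 < a.2)) x ys := rfl
          rw [this, if_pos (by simpa using hlt)]
      rw [hrest]
      have htail : ∀ k' ∈ t, (cs ++ [x]).filter (fun q => q.2 == k') = cs.filter (fun q => q.2 == k') := by
        intro k' hk'
        have hne : ¬ (x.2 = k') := by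
          intro h
          exact absurd (h ▸ hpair.1 k' hk') (by rw [hxk]; exact lt_irrefl k)
        simp [List.filter_append, hne]
      rw [List.flatMap_congr htail]
      have hhead : (cs ++ [x]).filter (fun q => q.2 == k) = cs.filter (fun q => q.2 == k) ++ [x] := by
        simp [List.filter_append, hxk]
      rw [hhead]
      simp
    · -- x belongs to a later bucket: skip the whole first bucket
      have hxt : x.2 ∈ t := by cases hx with | head => exact absurd rfl hxk | tail _ h => exact h
      rw [pv_insertBy_append _ _ _ _ (by
        intro a ha
        have ha2 : a.2 = k := by simpa using List.of_mem_filter ha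
        have : x.2 < k := hpair.1 x.2 hxt
        simp [ha2]; omega)]
      have hhead : (cs ++ [x]).filter (fun q => q.2 == k) = cs.filter (fun q => q.2 == k) := by
        simp [List.filter_append, hxk]
      rw [hhead, ih hpair.2 hxt]

-- range(n, 0, -1) is n, n-1, …, 1
theorem pv_range_desc (n : Nat) :
    PySem.List.pyRange (n : Int) 0 (-1) = (List.range n).map (fun (k : Nat) => (n : Int) - (k : Int)) := by
  unfold PySem.List.pyRange
  rcases Nat.eq_zero_or_pos n with h0 | hpos
  · subst h0; simp
  · have hlt : (0 : Int) < (n : Int) := by exact_mod_cast hpos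
    simp only [if_neg (by norm_num : ¬ ((-1 : Int) = 0)), if_neg (by norm_num : ¬ ((0:Int) < -1)), if_pos hlt]
    have h2 : ((((n : Int) - 0 + - -1 - 1) / - -1).toNat) = n := by simp
    rw [h2]
    apply List.map_congr_left
    intro k _
    ring

theorem pv_mem_range_desc (n : Nat) (x : Int) :
    x ∈ PySem.List.pyRange (n : Int) 0 (-1) ↔ 1 ≤ x ∧ x ≤ n := by
  rw [pv_range_desc]
  simp only [List.mem_map, List.mem_range]
  constructor
  · rintro ⟨k, hk, rfl⟩; omega
  · rintro ⟨h1, h2⟩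
    exact ⟨(n - x.toNat), by omega, by omega⟩

theorem pv_pairwise_range_desc (n : Nat) :
    (PySem.List.pyRange (n : Int) 0 (-1)).Pairwise (fun a b => b < a) := by
  rw [pv_range_desc]
  apply List.pairwise_map.mpr
  apply List.Pairwise.imp _ (List.pairwise_lt_range (n := n))
  intro a b hab
  omega

-- the stable reverse sort of the candidates is the high-to-low concatenation of the buckets
theorem pv_sorted_eq_flatMap (ks : List Int) (hks : ks.Pairwise (fun a b => b < a)) :
    ∀ cs : List (String × Int), (∀ q ∈ cs, q.2 ∈ ks) →
    PySem.List.sorted cs (fun x => x.2) true = ks.flatMap (fun k => cs.filter (fun q => q.2 == k)) := by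
  intro cs
  induction cs using List.reverseRecOn with
  | nil => intro _; simp [PySem.List.sorted_rev_eq_foldl_insertBy]
  | append_singleton t x ih =>
    intro h
    have ht : ∀ q ∈ t, q.2 ∈ ks := fun q hq => h q (by simp [hq])
    have hx : x.2 ∈ ks := h x (by simp)
    rw [PySem.List.sorted_rev_eq_foldl_insertBy, List.foldl_append, List.foldl_cons, List.foldl_nil,
      ← PySem.List.sorted_rev_eq_foldl_insertBy, ih ht]
    exact pv_insert_buckets ks hks x hx t

-- ===== VERDICT (by name: the statement is the Claim_ definition above) =====
theorem fast_filter_spec : Claim_equal_fast_filter := by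
  intro rl ei _ _
  unfold Spec_fast_filter fast_filter fast_filter_alt
  dsimp only
  set n := (PySem.Set.ofList rl).length with hn
  set L := (PySem.Dict.ofList ei).items with hL
  have hA : L.foldl (fun acc p =>
      match pvKeyLemmas? p.2 with
      | none => acc
      | some key_lemmas =>
        if pvInter key_lemmas rl ≠ [] then acc ++ [(p.1, ((pvInter key_lemmas rl).length : Int))] else acc) []
      = L.foldl (pvStepA rl) [] := rfl
  rw [hA]
  set cs := L.foldl (pvStepA rl) [] with hcs
  have hinit : pvBucketsOf n [] = List.replicate (n + 1) [] := by
    apply List.ext_getElem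
    · simp [pvBucketsOf_length]
    · intro k hk1 hk2
      rw [pvBucketsOf_getElem n [] k (by simpa [pvBucketsOf_length] using hk1)]
      simp
  rw [← hinit, pv_fold_buckets rl L [], ← hcs]
  have hmem : ∀ q ∈ cs, q.2 ∈ PySem.List.pyRange (n : Int) 0 (-1) := by
    intro q hq
    exact (pv_mem_range_desc n q.2).mpr (pv_cands_bound rl L [] (by simp) q hq)
  rw [pv_sorted_eq_flatMap _ (pv_pairwise_range_desc n) cs hmem]
  rw [PySem.List.foldl_append_eq_flatMap, List.nil_append, List.map_flatMap]
  apply List.flatMap_congr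
  intro k hk
  have hk' := (pv_mem_range_desc n k).mp hk
  have hkn : k.toNat < n + 1 := by omega
  rw [List.getD_eq_getElem _ _ (by rw [pvBucketsOf_length]; omega), pvBucketsOf_getElem n cs k.toNat hkn]
  have hke : ((k.toNat : Int)) = k := by omega
  rw [hke]
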